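-- pv_equiv track=rewrite | github.com/bornalgo/py-cpp-bindings | src/tools/string_tools.py | join_iterable
-- ===== SOURCE A (Python) =====
-- from typing import Optional, List, Set, Iterable
--
-- def join_iterable(iterable: Iterable, separator: str = ', ', end_separator: str = ' and ') -> str:
--     # Convert the iterable elements to strings
--     iterable = map(str, iterable)
--
--     # Convert the iterable to a list
--     iterable = list(iterable)
--
--     # If the iterable is empty, return an empty string
--     if not iterable:
--         return ''
--
--     # If there's only one element, return it as a string
--     if len(iterable) == 1:
--         return iterable[0]
--
--     # Initialize the result string
--     result = ''
--
--     # Iterate through the elements in the iterable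
--     for i, item in enumerate(iterable):
--         if i == 0:
--             # For the first item, just add it to the result
--             result += item
--         elif i == len(iterable) - 1:
--             # For the last item, add the end_separator before appending it to the result
--             result += end_separator + item
--         else:
--             # For all other items, add the separator before appending them to the result
--             result += separator + item
--
--     return result
-- ===== SOURCE B (Python) =====
-- def join_iterable(iterable, separator=', ', end_separator=' and '):
--     items = [str(x) for x in iterable]
--     if not items:
--         return ''
--     if len(items) == 1:
--         return items[0]
--     return separator.join(items[:-1]) + end_separator + items[-1]
-- ===== Notes on version B (the rewrite author's own statement) =====
-- stated objective: idiomatic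
-- what changed: Replaces the enumerate loop with its first/middle/last index branching and string accumulator by a single expression: separator.join over all but the last element, then end_separator and the last element.
import Mathlib
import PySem

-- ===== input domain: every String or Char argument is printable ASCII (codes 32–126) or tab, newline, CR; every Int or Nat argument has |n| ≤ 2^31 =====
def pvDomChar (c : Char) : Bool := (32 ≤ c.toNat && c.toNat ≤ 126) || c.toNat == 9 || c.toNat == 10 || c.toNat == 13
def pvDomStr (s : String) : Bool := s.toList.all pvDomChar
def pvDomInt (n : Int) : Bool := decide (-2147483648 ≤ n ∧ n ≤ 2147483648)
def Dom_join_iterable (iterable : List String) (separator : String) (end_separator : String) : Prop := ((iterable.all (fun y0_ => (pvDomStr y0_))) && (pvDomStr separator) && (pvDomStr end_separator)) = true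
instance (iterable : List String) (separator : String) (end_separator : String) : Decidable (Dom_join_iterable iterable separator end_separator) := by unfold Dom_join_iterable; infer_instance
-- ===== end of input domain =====

-- B replaces A's enumerate loop (first/middle/last index branching into a string accumulator)
-- by one expression: separator.join of all but the last element, then end_separator and the last element.


-- ===== PORT A =====
-- Python's 'map(str, iterable)' is the identity on a list of strings; we keep the copy step literally.
def join_iterable (iterable : List String) (separator : String) (end_separator : String) : String :=
  let items := iterable.map (fun s => s)
  if items = [] then ""
  else if items.length = 1 then PySem.List.pyGetD items 0 ""
  else (PySem.List.enumerate items).foldl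
    (fun result p =>
      if p.1 = 0 then result ++ p.2
      else if p.1 = (items.length : Int) - 1 then result ++ (end_separator ++ p.2)
      else result ++ (separator ++ p.2)) ""

-- ===== PORT B =====
def join_iterable_alt (iterable : List String) (separator : String) (end_separator : String) : String :=
  let items := iterable.map (fun s => s)
  if items = [] then ""
  else if items.length = 1 then PySem.List.pyGetD items 0 ""
  else PySem.Str.join separator (PySem.List.slice items none (some (-1)))
        ++ end_separator ++ PySem.List.pyGetD items (-1) ""

-- ===== PRECONDITION & SPEC =====
def Spec_join_iterable (iterable : List String) (separator : String) (end_separator : String) (out : String) : Prop := out = join_iterable_alt iterable separator end_separator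
instance (iterable : List String) (separator : String) (end_separator : String) (out : String) : Decidable (Spec_join_iterable iterable separator end_separator out) := by unfold Spec_join_iterable; infer_instance

-- ===== CLAIM (what is proved, stated in full; the proofs are below) =====
def Claim_equal_join_iterable : Prop := ∀ (iterable : List String) (separator : String) (end_separator : String), Dom_join_iterable iterable separator end_separator → Spec_join_iterable iterable separator end_separator (join_iterable iterable separator end_separator)

-- ===== LEMMAS AND PROOFS =====

/-- The middle part of the joined string: `sep ++ y` for each element of `mid`, concatenated. -/
def midJoin (sep : String) : List String → String
  | [] => ""
  | y :: ys => sep ++ y ++ midJoin sep ys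

theorem join_cons_midJoin (sep : String) (mid : List String) : ∀ (x : String),
    PySem.Str.join sep (x :: mid) = x ++ midJoin sep mid := by
  induction mid with
  | nil =>
      intro x; apply String.toList_inj.mp
      simp [PySem.Str.join, PySem.Chars.join_singleton, midJoin]
  | cons m mid' ih =>
      intro x
      have h : PySem.Str.join sep (x :: m :: mid') = x ++ sep ++ PySem.Str.join sep (m :: mid') := by
        apply String.toList_inj.mp
        simp [PySem.Str.join, PySem.Chars.join_cons_cons]
      rw [h, ih m]
      apply String.toList_inj.mp; simp [midJoin]

/-- A's loop over the tail of the list (indices `s ≥ 1`): the `i == 0` branch never fires,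
the `i == n-1` branch fires exactly at the final element. -/
theorem loopL (sep es : String) (n : Int) (mid : List String) (z : String) :
    ∀ (s : Nat) (acc : String), 1 ≤ s → n = (s : Int) + mid.length + 1 →
    (PySem.List.enumerate (mid ++ [z]) (s : Int)).foldl
      (fun result p =>
        if p.1 = 0 then result ++ p.2
        else if p.1 = n - 1 then result ++ (es ++ p.2)
        else result ++ (sep ++ p.2)) acc
    = acc ++ (midJoin sep mid ++ (es ++ z)) := by
  induction mid with
  | nil =>
      intro s acc hs hn
      rw [List.nil_append, PySem.List.enumerate_cons, PySem.List.enumerate_nil]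
      simp only [List.foldl_cons, List.foldl_nil]
      rw [if_neg (by omega), if_pos (by simp at hn; omega)]
      apply String.toList_inj.mp; simp [midJoin]
  | cons m mid' ih =>
      intro s acc hs hn
      rw [List.cons_append, PySem.List.enumerate_cons]
      simp only [List.foldl_cons]
      rw [if_neg (by omega), if_neg (by simp at hn; omega)]
      have hcast : ((s : Int) + 1) = ((s + 1 : Nat) : Int) := by push_cast; ring
      rw [hcast, ih (s + 1) (acc ++ (sep ++ m)) (by omega) (by simp at hn ⊢; omega)]
      apply String.toList_inj.mp; simp [midJoin]

-- ===== VERDICT (by name: the statement is the Claim_ definition above) =====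
theorem join_iterable_spec : Claim_equal_join_iterable := by
  intro iterable separator end_separator _
  unfold Spec_join_iterable join_iterable join_iterable_alt
  simp only [List.map_id_fun', id]
  match iterable with
  | [] => simp
  | [x] => simp
  | x :: y :: rest =>
      have hne : (x :: y :: rest : List String) ≠ [] := by simp
      have hlen : (x :: y :: rest : List String).length ≠ 1 := by simp
      rw [if_neg hne, if_neg hlen, if_neg hne, if_neg hlen]
      rcases List.eq_nil_or_concat (y :: rest) with h | ⟨mid, z, h⟩
      · exact absurd h (by simp)
      · rw [List.concat_eq_append] at h
        rw [h]
        -- B side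
        have hsl : PySem.List.slice (x :: (mid ++ [z])) none (some (-1)) = x :: mid := by
          have : (x :: (mid ++ [z])) = (x :: mid) ++ [z] := by simp
          rw [this, PySem.List.slice_to_neg_one, List.dropLast_concat]
        rw [hsl,
            show (x :: (mid ++ [z])) = (x :: mid) ++ [z] by simp,
            PySem.List.pyGetD_neg_one_append_singleton, join_cons_midJoin]
        -- A side
        rw [show ((x :: mid) ++ [z] : List String) = x :: (mid ++ [z]) by simp,
            PySem.List.enumerate_cons]
        simp only [List.foldl_cons, reduceIte]
        rw [show ((0 : Int) + 1) = ((1 : Nat) : Int) by norm_num,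
            loopL separator end_separator ((x :: (mid ++ [z])).length : Int) mid z 1 ("" ++ x) (by omega) (by simp; ring)]
        apply String.toList_inj.mp; simp
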